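-- pv_equiv track=rewrite | github.com/hexanna1/hex-study | pattern_enumeration.py | _max_pair_delta
-- ===== SOURCE A (Python) =====
-- from typing import Iterable
--
-- Point = tuple[int, int]
--
-- def _delta(a: Point, b: Point) -> int:
--     dq = int(a[0]) - int(b[0])
--     dr = int(a[1]) - int(b[1])
--     return int(dq * dq + dq * dr + dr * dr)
--
-- def _max_pair_delta(points: Iterable[Point]) -> int:
--     pts = tuple(points)
--     if len(pts) <= 1:
--         return 0
--     best = 0
--     for i, a in enumerate(pts):
--         for b in pts[i + 1 :]:
--             best = max(best, _delta(a, b))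
--     return int(best)
-- ===== SOURCE B (Python) =====
-- from typing import Iterable
--
-- Point = tuple[int, int]
--
-- def _max_pair_delta(points: Iterable[Point]) -> int:
--     # Convexity pruning: for a fixed endpoint, the quadratic form is a convex
--     # quadratic in the other point's r-coordinate, so over each column (fixed q)
--     # it is maximised at the extreme r.  Group points by q once, keep only the
--     # min-r/max-r point of every column, then compare the candidates in a single
--     # streaming pass against the previously seen candidates.
--     ext: dict[int, tuple[int, int]] = {}
--     for q, r in points:
--         lo, hi = ext.get(q, (r, r))
--         ext[q] = (min(lo, r), max(hi, r))
--     cand = [(q, r) for q, (lo, hi) in ext.items()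
--             for r in ((lo,) if lo == hi else (lo, hi))]
--     best = 0
--     seen: list[Point] = []
--     for p in cand:
--         for s in seen:
--             dq = p[0] - s[0]
--             dr = p[1] - s[1]
--             d = dq * dq + dq * dr + dr * dr
--             if d > best:
--                 best = d
--         seen.append(p)
--     return best
-- ===== Notes on version B (the rewrite author's own statement) =====
-- stated objective: faster
-- what changed: B replaces A's all-pairs scan over the raw points by a convexity-based pruning algorithm: one grouping pass builds a dict q -> (min r, max r), only the two extreme points of each column survive as candidates (the form is a convex quadratic in either coordinate, so the pairwise maximum is attained at column extremes), and the candidates are compared in a single streaming pass against previously seen candidates.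
import Mathlib
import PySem

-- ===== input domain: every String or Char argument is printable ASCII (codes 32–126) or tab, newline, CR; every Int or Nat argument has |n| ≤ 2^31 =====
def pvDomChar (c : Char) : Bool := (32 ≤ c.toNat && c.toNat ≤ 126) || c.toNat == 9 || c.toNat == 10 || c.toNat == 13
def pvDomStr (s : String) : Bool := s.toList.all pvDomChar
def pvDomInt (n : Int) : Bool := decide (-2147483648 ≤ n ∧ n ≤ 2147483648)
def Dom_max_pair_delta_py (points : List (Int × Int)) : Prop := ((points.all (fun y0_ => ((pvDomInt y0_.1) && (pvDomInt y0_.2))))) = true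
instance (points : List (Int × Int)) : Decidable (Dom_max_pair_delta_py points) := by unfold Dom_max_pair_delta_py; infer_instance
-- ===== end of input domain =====

-- B replaces A's all-pairs scan by convexity pruning (keep only each column's
-- extreme-r points, found via one dict pass) plus a streaming pass over the
-- candidates; same value on every input, quadratic only in the pruned candidates.

-- ===== PORT A =====
def pyDelta (a b : Int × Int) : Int :=
  let dq := a.1 - b.1
  let dr := a.2 - b.2
  dq * dq + dq * dr + dr * dr

def max_pair_delta_py (points : List (Int × Int)) : Int :=
  if points.length ≤ 1 then 0
  else
    (PySem.List.enumerate points).foldl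
      (fun best ia =>
        (PySem.List.slice points (some (ia.1 + 1)) none).foldl
          (fun best b => max best (pyDelta ia.2 b)) best)
      0

-- ===== PORT B =====
-- grouping pass: ext[q] = (min r, max r) of the column q
def buildExt (points : List (Int × Int)) : PySem.Dict Int (Int × Int) :=
  points.foldl
    (fun d p =>
      let lohi := d.getD p.1 (p.2, p.2)
      d.insert p.1 (min lohi.1 p.2, max lohi.2 p.2))
    PySem.Dict.empty

-- the candidate list: the extreme point(s) of every column, in dict order
def candOf (points : List (Int × Int)) : List (Int × Int) :=
  (buildExt points).items.flatMap
    (fun e => (if e.2.1 == e.2.2 then [e.2.1] else [e.2.1, e.2.2]).map (fun r => (e.1, r)))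

-- streaming pass: compare each candidate against the previously seen ones
def bStep (st : List (Int × Int) × Int) (p : Int × Int) : List (Int × Int) × Int :=
  (st.1 ++ [p],
   st.1.foldl
     (fun best s =>
       let dq := p.1 - s.1
       let dr := p.2 - s.2
       let d := dq * dq + dq * dr + dr * dr
       if d > best then d else best)
     st.2)

def max_pair_delta_py_alt (points : List (Int × Int)) : Int :=
  ((candOf points).foldl bStep ([], 0)).2

-- ===== PRECONDITION & SPEC =====
def Spec_max_pair_delta_py (points : List (Int × Int)) (out : Int) : Prop := out = max_pair_delta_py_alt points
instance (points : List (Int × Int)) (out : Int) : Decidable (Spec_max_pair_delta_py points out) := by unfold Spec_max_pair_delta_py; infer_instance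

-- ===== CLAIM (what is proved, stated in full; the proofs are below) =====
def Claim_equal_max_pair_delta_py : Prop := ∀ (points : List (Int × Int)), Dom_max_pair_delta_py points → Spec_max_pair_delta_py points (max_pair_delta_py points)

-- ===== LEMMAS AND PROOFS =====

-- ---- generic max-fold facts ----
theorem foldl_max_le_of (l : List Int) : ∀ (i m : Int), i ≤ m → (∀ v ∈ l, v ≤ m) → l.foldl max i ≤ m := by
  induction l with
  | nil => intro i m h _; simpa using h
  | cons a t ih =>
    intro i m h hall
    exact ih (max i a) m (max_le h (hall a (by simp))) (fun v hv => hall v (by simp [hv]))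

-- ---- delta facts ----
theorem pyDelta_self (a : Int × Int) : pyDelta a a = 0 := by simp [pyDelta]

theorem pyDelta_comm (a b : Int × Int) : pyDelta a b = pyDelta b a := by
  show (a.1 - b.1) * (a.1 - b.1) + (a.1 - b.1) * (a.2 - b.2) + (a.2 - b.2) * (a.2 - b.2)
     = (b.1 - a.1) * (b.1 - a.1) + (b.1 - a.1) * (b.2 - a.2) + (b.2 - a.2) * (b.2 - a.2)
  ring

-- the quadratic form is a convex quadratic in the second point's r-coordinate:
-- on lo ≤ r ≤ hi it is bounded by its value at the endpoints
theorem pyDelta_convex_snd (a : Int × Int) (q lo r hi : Int) (h1 : lo ≤ r) (h2 : r ≤ hi) :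
    pyDelta a (q, r) ≤ max (pyDelta a (q, lo)) (pyDelta a (q, hi)) := by
  by_cases heq : lo = hi
  · subst heq
    have hr : r = lo := le_antisymm h2 h1
    subst hr
    exact le_max_left _ _
  · have hlt : lo < hi := lt_of_le_of_ne (h1.trans h2) heq
    rcases le_total (pyDelta a (q, lo)) (pyDelta a (q, hi)) with h | h
    · refine le_max_of_le_right ?_
      simp only [pyDelta] at h ⊢
      nlinarith [mul_nonneg (mul_nonneg (sub_nonneg.2 h1) (sub_nonneg.2 h2)) (sub_nonneg.2 (le_of_lt hlt)), mul_nonneg (sub_nonneg.2 h2) (sub_nonneg.2 h)]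
    · refine le_max_of_le_left ?_
      simp only [pyDelta] at h ⊢
      nlinarith [mul_nonneg (mul_nonneg (sub_nonneg.2 h1) (sub_nonneg.2 h2)) (sub_nonneg.2 (le_of_lt hlt)), mul_nonneg (sub_nonneg.2 h1) (sub_nonneg.2 h)]

-- ---- A's loop: the list of deltas over all i<j pairs ----
def pairVals {α : Type} (f : α → α → Int) : List α → List Int
  | [] => []
  | a :: t => t.map (f a) ++ pairVals f t

theorem drop_succ_of_drop_cons {α : Type} {orig t : List α} {a : α} {s : Nat}
    (h : orig.drop s = a :: t) : orig.drop (s + 1) = t := by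
  have h2 : (orig.drop s).drop 1 = t := by rw [h]; rfl
  rw [List.drop_drop] at h2
  simpa [Nat.add_comm] using h2

theorem enum_slice_foldl {α : Type} (f : α → α → Int) :
    ∀ (t orig : List α) (s : Nat) (init : Int), orig.drop s = t →
      (PySem.List.enumerate t (s : Int)).foldl
        (fun best ia =>
          (PySem.List.slice orig (some (ia.1 + 1)) none).foldl
            (fun best b => max best (f ia.2 b)) best) init
      = (pairVals f t).foldl max init := by
  intro t
  induction t with
  | nil => intro orig s init _; simp [PySem.List.enumerate, pairVals]
  | cons a t ih =>
    intro orig s init h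
    rw [PySem.List.enumerate_cons, List.foldl_cons]
    have hc : (s : Int) + 1 = ((s + 1 : Nat) : Int) := by push_cast; ring
    rw [hc, PySem.List.slice_from_natCast, drop_succ_of_drop_cons h,
      ih orig (s + 1) _ (drop_succ_of_drop_cons h)]
    simp [pairVals, List.foldl_append, List.foldl_map]

theorem A_eq_pairVals (points : List (Int × Int)) :
    max_pair_delta_py points = (pairVals pyDelta points).foldl max 0 := by
  unfold max_pair_delta_py
  split_ifs with h
  · match points, h with
    | [], _ => rfl
    | [a], _ => rfl
  · have := enum_slice_foldl pyDelta points points 0 0 (by simp)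
    simpa using this

theorem mem_pairVals_exists {α : Type} (f : α → α → Int) :
    ∀ (l : List α) (v : Int), v ∈ pairVals f l → ∃ a b, a ∈ l ∧ b ∈ l ∧ v = f a b := by
  intro l
  induction l with
  | nil => intro v hv; simp [pairVals] at hv
  | cons a t ih =>
    intro v hv
    simp only [pairVals, List.mem_append, List.mem_map] at hv
    rcases hv with ⟨b, hb, rfl⟩ | hv
    · exact ⟨a, b, by simp, by simp [hb], rfl⟩
    · obtain ⟨x, y, hx, hy, rfl⟩ := ih v hv
      exact ⟨x, y, by simp [hx], by simp [hy], rfl⟩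

theorem pairVals_mem_of_ne {α : Type} (f : α → α → Int) :
    ∀ (l : List α) (x y : α), x ∈ l → y ∈ l → x ≠ y →
      f x y ∈ pairVals f l ∨ f y x ∈ pairVals f l := by
  intro l
  induction l with
  | nil => intro x y hx _ _; simp at hx
  | cons a t ih =>
    intro x y hx hy hne
    rcases List.mem_cons.1 hx with rfl | hx
    · have hy' : y ∈ t := by
        rcases List.mem_cons.1 hy with rfl | hy'
        · exact absurd rfl hne
        · exact hy'
      exact Or.inl (by simp [pairVals, List.mem_append]; exact Or.inl ⟨y, hy', rfl⟩)
    · rcases List.mem_cons.1 hy with rfl | hy'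
      · have hx' : x ∈ t := by
          rcases List.mem_cons.1 hx with rfl | h
          · exact absurd rfl hne
          · exact h
        exact Or.inr (by simp [pairVals, List.mem_append]; exact Or.inl ⟨x, hx', rfl⟩)
      · rcases ih x y hx hy' hne with h | h
        · exact Or.inl (by simp [pairVals, List.mem_append, h])
        · exact Or.inr (by simp [pairVals, List.mem_append, h])

-- ---- B's streaming loop: the deltas of each element against the earlier ones ----
def streamVals {α : Type} (f : α → α → Int) : List α → List α → List Int
  | _, [] => []
  | seen, p :: t => seen.map (fun s => f p s) ++ streamVals f (seen ++ [p]) t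

theorem B_foldl_eq_stream :
    ∀ (l seen : List (Int × Int)) (best : Int),
      (l.foldl bStep (seen, best)).2 = (streamVals pyDelta seen l).foldl max best := by
  intro l
  induction l with
  | nil => intro seen best; simp [streamVals]
  | cons p t ih =>
    intro seen best
    have hstep : bStep (seen, best) p
        = (seen ++ [p], (seen.map (fun s => pyDelta p s)).foldl max best) := by
      simp only [bStep, List.foldl_map]
      refine Prod.ext rfl ?_
      simp only []
      congr 1
      funext b s
      simp only [pyDelta, max_def]
      split_ifs <;> omega
    rw [List.foldl_cons, hstep, ih, streamVals, List.foldl_append]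

theorem mem_streamVals_exists {α : Type} (f : α → α → Int) :
    ∀ (l seen : List α) (v : Int), v ∈ streamVals f seen l →
      ∃ p s, p ∈ l ∧ s ∈ seen ++ l ∧ v = f p s := by
  intro l
  induction l with
  | nil => intro seen v hv; simp [streamVals] at hv
  | cons p t ih =>
    intro seen v hv
    simp only [streamVals, List.mem_append, List.mem_map] at hv
    rcases hv with ⟨s, hs, rfl⟩ | hv
    · exact ⟨p, s, by simp, by simp [hs], rfl⟩
    · obtain ⟨x, s, hx, hs, rfl⟩ := ih (seen ++ [p]) v hv
      refine ⟨x, s, by simp [hx], ?_, rfl⟩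
      simp only [List.mem_append] at hs ⊢
      rcases hs with (hs | hs) | hs
      · exact Or.inl hs
      · simp only [List.mem_singleton] at hs; exact Or.inr (by simp [hs])
      · exact Or.inr (by simp [hs])

theorem stream_mem_of {α : Type} (f : α → α → Int) :
    ∀ (l seen : List α) (a b : α), a ∈ seen → b ∈ l →
      f b a ∈ streamVals f seen l := by
  intro l
  induction l with
  | nil => intro seen a b _ hb; simp at hb
  | cons p t ih =>
    intro seen a b ha hb
    rcases List.mem_cons.1 hb with rfl | hb
    · simp only [streamVals, List.mem_append, List.mem_map]
      exact Or.inl ⟨a, ha, rfl⟩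
    · simp only [streamVals, List.mem_append]
      exact Or.inr (ih (seen ++ [p]) a b (by simp [ha]) hb)

theorem stream_pair_mem {α : Type} (f : α → α → Int) :
    ∀ (l seen : List α) (x y : α), x ∈ l → y ∈ l → x ≠ y →
      f x y ∈ streamVals f seen l ∨ f y x ∈ streamVals f seen l := by
  intro l
  induction l with
  | nil => intro seen x y hx _ _; simp at hx
  | cons p t ih =>
    intro seen x y hx hy hne
    rcases List.mem_cons.1 hx with rfl | hx
    · have hy' : y ∈ t := by
        rcases List.mem_cons.1 hy with rfl | h
        · exact absurd rfl hne
        · exact h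
      refine Or.inr ?_
      simp only [streamVals, List.mem_append]
      exact Or.inr (stream_mem_of f t (seen ++ [x]) x y (by simp) hy')
    · rcases List.mem_cons.1 hy with rfl | hy'
      · have hx' : x ∈ t := by
          rcases List.mem_cons.1 hx with rfl | h
          · exact absurd rfl hne
          · exact h
        refine Or.inl ?_
        simp only [streamVals, List.mem_append]
        exact Or.inr (stream_mem_of f t (seen ++ [y]) y x (by simp) hx')
      · rcases ih (seen ++ [p]) x y hx hy' hne with h | h
        · exact Or.inl (by simp only [streamVals, List.mem_append]; exact Or.inr h)
        · exact Or.inr (by simp only [streamVals, List.mem_append]; exact Or.inr h)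

-- ---- the grouping dict: its entries are column extremes of the input ----
def extStep (d : PySem.Dict Int (Int × Int)) (p : Int × Int) : PySem.Dict Int (Int × Int) :=
  let lohi := d.getD p.1 (p.2, p.2)
  d.insert p.1 (min lohi.1 p.2, max lohi.2 p.2)

theorem buildExt_eq (points : List (Int × Int)) :
    buildExt points = points.foldl extStep PySem.Dict.empty := rfl

-- entries only mention actual input points
theorem ext_inv1 (S : List (Int × Int)) :
    ∀ (l : List (Int × Int)) (d : PySem.Dict Int (Int × Int)),
      (∀ q lo hi, d.get? q = some (lo, hi) → lo ≤ hi ∧ (q, lo) ∈ S ∧ (q, hi) ∈ S) →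
      (∀ p ∈ l, p ∈ S) →
      ∀ q lo hi, (l.foldl extStep d).get? q = some (lo, hi) → lo ≤ hi ∧ (q, lo) ∈ S ∧ (q, hi) ∈ S := by
  intro l
  induction l with
  | nil => intro d hd _; exact hd
  | cons p t ih =>
    intro d hd hsub
    refine ih (extStep d p) ?_ (fun x hx => hsub x (by simp [hx]))
    intro q lo hi hget
    by_cases hq : q = p.1
    · subst hq
      rw [extStep, PySem.Dict.get?_insert_self] at hget
      have hpS : p ∈ S := hsub p (by simp)
      rcases hget' : d.get? p.1 with _ | lohi0
      · have : d.getD p.1 (p.2, p.2) = (p.2, p.2) := by rw [PySem.Dict.getD_eq_get?_getD, hget']; rfl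
        rw [this] at hget
        simp only [Option.some.injEq, Prod.mk.injEq] at hget
        obtain ⟨h1, h2⟩ := hget
        have hlo : lo = p.2 := by omega
        have hhi : hi = p.2 := by omega
        subst hlo; subst hhi
        exact ⟨le_refl _, by simpa using hpS, by simpa using hpS⟩
      · have : d.getD p.1 (p.2, p.2) = lohi0 := by rw [PySem.Dict.getD_eq_get?_getD, hget']; rfl
        rw [this] at hget
        obtain ⟨hle, hloS, hhiS⟩ := hd p.1 lohi0.1 lohi0.2 (by simpa using hget')
        simp only [Option.some.injEq, Prod.mk.injEq] at hget
        obtain ⟨h1, h2⟩ := hget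
        constructor
        · omega
        · constructor
          · rcases min_choice lohi0.1 p.2 with hm | hm <;> rw [← h1, hm]
            · exact hloS
            · simpa using hpS
          · rcases max_choice lohi0.2 p.2 with hm | hm <;> rw [← h2, hm]
            · exact hhiS
            · simpa using hpS
    · rw [extStep, PySem.Dict.get?_insert] at hget
      rw [if_neg hq] at hget
      exact hd q lo hi hget

-- an entry, once covering a value, keeps covering it
theorem ext_mono :
    ∀ (l : List (Int × Int)) (d : PySem.Dict Int (Int × Int)) (q lo hi : Int),
      d.get? q = some (lo, hi) →
      ∃ lo' hi', (l.foldl extStep d).get? q = some (lo', hi') ∧ lo' ≤ lo ∧ hi ≤ hi' := by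
  intro l
  induction l with
  | nil => intro d q lo hi h; exact ⟨lo, hi, h, le_refl _, le_refl _⟩
  | cons p t ih =>
    intro d q lo hi h
    by_cases hq : q = p.1
    · subst hq
      have hD : d.getD p.1 (p.2, p.2) = (lo, hi) := by rw [PySem.Dict.getD_eq_get?_getD, h]; rfl
      have hstep : (extStep d p).get? p.1 = some (min lo p.2, max hi p.2) := by
        rw [extStep, hD, PySem.Dict.get?_insert_self]
      obtain ⟨lo', hi', hg, h1, h2⟩ := ih (extStep d p) p.1 _ _ hstep
      exact ⟨lo', hi', hg, le_trans h1 (min_le_left _ _), le_trans (le_max_left _ _) h2⟩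
    · have hstep : (extStep d p).get? q = some (lo, hi) := by
        rw [extStep, PySem.Dict.get?_insert]
        rw [if_neg hq]; exact h
      exact ih (extStep d p) q lo hi hstep

-- every processed point is covered by its column's entry
theorem ext_inv2 :
    ∀ (l : List (Int × Int)) (d : PySem.Dict Int (Int × Int)) (p : Int × Int), p ∈ l →
      ∃ lo hi, (l.foldl extStep d).get? p.1 = some (lo, hi) ∧ lo ≤ p.2 ∧ p.2 ≤ hi := by
  intro l
  induction l with
  | nil => intro d p hp; simp at hp
  | cons x t ih =>
    intro d p hp
    simp only [List.foldl_cons]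
    rcases List.mem_cons.1 hp with rfl | hp
    · rcases hget : d.get? p.1 with _ | lohi0
      · have hD : d.getD p.1 (p.2, p.2) = (p.2, p.2) := by rw [PySem.Dict.getD_eq_get?_getD, hget]; rfl
        have hstep : (extStep d p).get? p.1 = some (min p.2 p.2, max p.2 p.2) := by
          rw [extStep, hD, PySem.Dict.get?_insert_self]
        obtain ⟨lo', hi', hg, h1, h2⟩ := ext_mono t (extStep d p) p.1 _ _ hstep
        exact ⟨lo', hi', hg, by simp at h1 ⊢; omega, by simp at h2 ⊢; omega⟩
      · have hD : d.getD p.1 (p.2, p.2) = lohi0 := by rw [PySem.Dict.getD_eq_get?_getD, hget]; rfl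
        have hstep : (extStep d p).get? p.1 = some (min lohi0.1 p.2, max lohi0.2 p.2) := by
          rw [extStep, hD, PySem.Dict.get?_insert_self]
        obtain ⟨lo', hi', hg, h1, h2⟩ := ext_mono t (extStep d p) p.1 _ _ hstep
        exact ⟨lo', hi', hg, le_trans h1 (min_le_right _ _), le_trans (le_max_right _ _) h2⟩
    · exact ih (extStep d x) p hp

theorem nodup_keys_buildExt (points : List (Int × Int)) : (buildExt points).keys.Nodup := by
  rw [buildExt_eq]
  exact PySem.Dict.nodup_keys_foldl_insert_key points Prod.fst
    (fun d p => (min (d.getD p.1 (p.2, p.2)).1 p.2, max (d.getD p.1 (p.2, p.2)).2 p.2))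
    PySem.Dict.empty (by simp)

-- candidates are input points
theorem cand_subset (points : List (Int × Int)) :
    ∀ x ∈ candOf points, x ∈ points := by
  intro x hx
  simp only [candOf, List.mem_flatMap, List.mem_map] at hx
  obtain ⟨e, he, r, hr, rfl⟩ := hx
  have hget : (buildExt points).get? e.1 = some e.2 :=
    PySem.Dict.get?_of_mem_items _ (by simpa using he) (nodup_keys_buildExt points)
  have hget' : (points.foldl extStep PySem.Dict.empty).get? e.1 = some (e.2.1, e.2.2) := by
    rw [← buildExt_eq]; simpa using hget
  have hinv := ext_inv1 points points PySem.Dict.empty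
    (by intro q lo hi h; rw [PySem.Dict.get?_empty] at h; cases h)
    (fun p hp => hp) e.1 e.2.1 e.2.2 hget'
  obtain ⟨hle, hlo, hhi⟩ := hinv
  split_ifs at hr with hEq
  · simp only [List.mem_singleton] at hr
    subst hr
    exact hlo
  · simp only [List.mem_cons, List.not_mem_nil, or_false] at hr
    rcases hr with rfl | rfl
    · exact hlo
    · exact hhi

-- every input point's column extremes are candidates and bracket it
theorem cand_covers (points : List (Int × Int)) :
    ∀ p ∈ points, ∃ lo hi, lo ≤ p.2 ∧ p.2 ≤ hi ∧
      (p.1, lo) ∈ candOf points ∧ (p.1, hi) ∈ candOf points := by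
  intro p hp
  obtain ⟨lo, hi, hget, h1, h2⟩ := ext_inv2 points PySem.Dict.empty p hp
  rw [← buildExt_eq] at hget
  have hmem : (p.1, (lo, hi)) ∈ (buildExt points).items :=
    PySem.Dict.mem_items_of_get?_eq_some _ hget
  have hc : ∀ r0 : Int, r0 = lo ∨ r0 = hi → (p.1, r0) ∈ candOf points := by
    intro r0 hr0
    simp only [candOf, List.mem_flatMap, List.mem_map]
    refine ⟨(p.1, (lo, hi)), hmem, r0, ?_, rfl⟩
    by_cases hEq : lo = hi
    · subst hEq; rcases hr0 with rfl | rfl <;> simp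
    · rcases hr0 with rfl | rfl <;> simp [hEq]
  exact ⟨lo, hi, h1, h2, hc lo (Or.inl rfl), hc hi (Or.inr rfl)⟩

-- ---- putting it together ----
theorem B_eq_stream (points : List (Int × Int)) :
    max_pair_delta_py_alt points = (streamVals pyDelta [] (candOf points)).foldl max 0 := by
  unfold max_pair_delta_py_alt
  exact B_foldl_eq_stream (candOf points) [] 0

theorem main_eq (points : List (Int × Int)) :
    max_pair_delta_py points = max_pair_delta_py_alt points := by
  rw [A_eq_pairVals, B_eq_stream]
  set cand := candOf points with hcand
  set MP := (pairVals pyDelta points).foldl max 0 with hMP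
  set MC := (streamVals pyDelta [] cand).foldl max 0 with hMC
  have hMP0 : (0 : Int) ≤ MP := (PySem.List.le_foldl_max _ 0).1
  have hMC0 : (0 : Int) ≤ MC := (PySem.List.le_foldl_max _ 0).1
  -- any delta of two candidates is bounded by B's max
  have hcb : ∀ x y : Int × Int, x ∈ cand → y ∈ cand → pyDelta x y ≤ MC := by
    intro x y hx hy
    by_cases hxy : x = y
    · subst hxy; rw [pyDelta_self]; exact hMC0
    · rcases stream_pair_mem pyDelta cand [] x y hx hy hxy with h | h
      · exact (PySem.List.le_foldl_max _ 0).2 _ h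
      · rw [pyDelta_comm]; exact (PySem.List.le_foldl_max _ 0).2 _ h
  apply le_antisymm
  · -- MP ≤ MC
    apply foldl_max_le_of _ _ _ hMC0
    intro v hv
    obtain ⟨a, b, ha, hb, rfl⟩ := mem_pairVals_exists pyDelta points v hv
    obtain ⟨lob, hib, hb1, hb2, hcl, hch⟩ := cand_covers points b hb
    have step1 : pyDelta a b ≤ max (pyDelta a (b.1, lob)) (pyDelta a (b.1, hib)) := by
      have := pyDelta_convex_snd a b.1 lob b.2 hib hb1 hb2
      simpa using this
    have bound : ∀ e : Int × Int, e ∈ cand → pyDelta a e ≤ MC := by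
      intro e he
      obtain ⟨loa, hia, ha1, ha2, hal, hah⟩ := cand_covers points a ha
      have step2 : pyDelta e a ≤ max (pyDelta e (a.1, loa)) (pyDelta e (a.1, hia)) := by
        have := pyDelta_convex_snd e a.1 loa a.2 hia ha1 ha2
        simpa using this
      rw [pyDelta_comm]
      exact le_trans step2 (max_le (hcb e _ he hal) (hcb e _ he hah))
    exact le_trans step1 (max_le (bound _ hcl) (bound _ hch))
  · -- MC ≤ MP
    apply foldl_max_le_of _ _ _ hMP0
    intro v hv
    obtain ⟨p, s, hp, hs, rfl⟩ := mem_streamVals_exists pyDelta cand [] v hv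
    simp only [List.nil_append] at hs
    have hp' := cand_subset points p hp
    have hs' := cand_subset points s hs
    by_cases hps : p = s
    · subst hps; rw [pyDelta_self]; exact hMP0
    · rcases pairVals_mem_of_ne pyDelta points p s hp' hs' hps with h | h
      · exact (PySem.List.le_foldl_max _ 0).2 _ h
      · rw [pyDelta_comm]; exact (PySem.List.le_foldl_max _ 0).2 _ h

-- ===== VERDICT (by name: the statement is the Claim_ definition above) =====
theorem max_pair_delta_py_spec : Claim_equal_max_pair_delta_py := by
  intro points _
  exact main_eq points
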